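-- pv_equiv track=rewrite | github.com/bulsu-miggy/bsit-4c-bustos | BSIT_4C_G2.py | format_choices
-- ===== SOURCE A (Python) =====
-- import math
--
-- def format_choices(choices):
--
--     texts = []
--
--     size = len(choices)
--     mid_number = math.ceil(size / 2)
--     for i in range(0, mid_number):
--         letter = list(choices)[i]
--         answer_description = list(choices.values())[i]
--         answer_text = letter + ". " + answer_description
--
--         if (i + mid_number >= size):
--             text = answer_text
--         else:
--             second_letter = list(choices)[i + mid_number]
--             second_answer_description = list(choices.values())[i + mid_number]
--             second_answer_text = second_letter + ". " + second_answer_description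
--             text = answer_text + "\t" + second_answer_text
--
--         texts.append(text)
--
--     return texts
-- ===== SOURCE B (Python) =====
-- import math
--
-- def format_choices(choices):
--     labels = [k + ". " + v for k, v in choices.items()]
--     mid = math.ceil(len(labels) / 2)
--     rows = []
--     for j, s in enumerate(labels):
--         if j < mid:
--             rows.append(s)
--         else:
--             rows[j - mid] += "\t" + s
--     return rows
-- ===== Notes on version B (the rewrite author's own statement) =====
-- stated objective: faster
-- what changed: B precomputes all 'k. v' labels in one pass, then makes a single enumerate pass over them in which left-half labels are appended as new rows and each right-half label is spliced (+=) into the already-built row j-mid, replacing A's half-length index loop that re-materialises list(choices) and list(choices.values()) on every iteration and pairs i with i+mid by offset lookups and a bound check.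
import Mathlib
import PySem

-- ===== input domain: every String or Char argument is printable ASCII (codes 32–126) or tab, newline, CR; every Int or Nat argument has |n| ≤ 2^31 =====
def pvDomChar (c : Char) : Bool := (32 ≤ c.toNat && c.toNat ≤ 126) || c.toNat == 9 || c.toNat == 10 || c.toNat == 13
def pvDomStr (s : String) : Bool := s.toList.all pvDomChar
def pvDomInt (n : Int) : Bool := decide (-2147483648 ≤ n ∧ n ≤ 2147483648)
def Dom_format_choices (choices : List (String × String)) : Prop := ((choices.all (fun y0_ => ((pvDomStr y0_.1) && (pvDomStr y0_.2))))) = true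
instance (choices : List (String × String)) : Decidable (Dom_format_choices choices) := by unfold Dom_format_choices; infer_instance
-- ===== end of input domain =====

-- B formats every label in a single enumerate pass that appends left-column labels and
-- splices right-column labels into the already-built rows, instead of A's half-length index
-- loop that re-materialises list(choices) with offset lookups (objective: faster, measured).
-- The dict parameter is the association list; both ports read it through PySem.Dict.ofList
-- (duplicate keys collapse exactly as in a Python dict).

-- ===== PORT A =====
-- math.ceil(size/2) is ported as (size+1) // 2, exact for the integer sizes reachable here.
def format_choices (choices : List (String × String)) : List String :=
  let d := PySem.Dict.ofList choices
  let size : Int := d.items.length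
  let mid_number : Int := PySem.Int.floordiv (size + 1) 2
  (PySem.List.pyRange 0 mid_number 1).foldl (fun texts i =>
    let letter := PySem.List.pyGetD d.keys i ""
    let answer_description := PySem.List.pyGetD d.values i ""
    let answer_text := letter ++ ". " ++ answer_description
    let text :=
      if i + mid_number ≥ size then answer_text
      else
        let second_letter := PySem.List.pyGetD d.keys (i + mid_number) ""
        let second_answer_description := PySem.List.pyGetD d.values (i + mid_number) ""
        let second_answer_text := second_letter ++ ". " ++ second_answer_description
        answer_text ++ "\t" ++ second_answer_text
    texts ++ [text]) []

-- ===== PORT B =====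
-- Source B's 'rows[j - mid] += "\t" + s' is List.modify at the (always in-range here) index (j - mid).
def format_choices_alt (choices : List (String × String)) : List String :=
  let labels := (PySem.Dict.ofList choices).items.map (fun p => p.1 ++ ". " ++ p.2)
  let mid : Int := ((labels.length + 1) / 2 : Nat)      -- math.ceil(len(labels)/2)
  (PySem.List.enumerate labels 0).foldl (fun rows x =>
    if x.1 < mid then rows ++ [x.2]
    else rows.modify (x.1 - mid).toNat (fun a => a ++ "\t" ++ x.2)) []

-- ===== PRECONDITION & SPEC =====
def Spec_format_choices (choices : List (String × String)) (out : List String) : Prop := out = format_choices_alt choices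
instance (choices : List (String × String)) (out : List String) : Decidable (Spec_format_choices choices out) := by unfold Spec_format_choices; infer_instance

-- ===== CLAIM (what is proved, stated in full; the proofs are below) =====
def Claim_equal_format_choices : Prop := ∀ (choices : List (String × String)), Dom_format_choices choices → Spec_format_choices choices (format_choices choices)

-- ===== LEMMAS AND PROOFS =====

-- Both ports are proved equal to this common two-column normal form of the result.
def pvRows (items : List (String × String)) : List String :=
  let mid := (items.length + 1) / 2
  let first := items.take mid
  let second := items.drop mid
  ((first.zip second).map (fun p => p.1.1 ++ ". " ++ p.1.2 ++ "\t" ++ p.2.1 ++ ". " ++ p.2.2))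
    ++ (first.drop second.length).map (fun p => p.1 ++ ". " ++ p.2)

theorem pv_foldl_push {α β : Type} (g : α → β) :
    ∀ (l : List α) (init : List β),
      l.foldl (fun acc x => acc ++ [g x]) init = init ++ l.map g := by
  intro l
  induction l with
  | nil => simp
  | cons x xs ih => intro init; simp [List.foldl, ih]

theorem pv_getD_map (items : List (String × String)) (f : String × String → String)
    (j : Nat) (hj : j < items.length) :
    PySem.List.pyGetD (items.map f) ((j : Nat) : Int) "" = f items[j] := by
  rw [PySem.List.pyGetD_natCast]
  simp [List.getD, List.getElem?_eq_getElem hj]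

-- A's loop body, folded over range(0, mid), equals the normal form.
theorem format_choices_core (items : List (String × String)) :
    (let size : Int := items.length
     let mid_number : Int := PySem.Int.floordiv (size + 1) 2
     (PySem.List.pyRange 0 mid_number 1).foldl (fun texts i =>
       let letter := PySem.List.pyGetD (items.map (·.1)) i ""
       let answer_description := PySem.List.pyGetD (items.map (·.2)) i ""
       let answer_text := letter ++ ". " ++ answer_description
       let text :=
         if i + mid_number ≥ size then answer_text
         else
           let second_letter := PySem.List.pyGetD (items.map (·.1)) (i + mid_number) ""
           let second_answer_description := PySem.List.pyGetD (items.map (·.2)) (i + mid_number) ""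
           let second_answer_text := second_letter ++ ". " ++ second_answer_description
           answer_text ++ "\t" ++ second_answer_text
       texts ++ [text]) []) = pvRows items := by
  simp only [pvRows]
  have hmid : PySem.Int.floordiv ((items.length : Int) + 1) 2
      = (((items.length + 1) / 2 : Nat) : Int) := by
    rw [PySem.Int.floordiv_eq_iff_of_pos (by omega)]
    constructor <;> push_cast <;> omega
  rw [hmid, pv_foldl_push, List.nil_append, PySem.List.pyRange_one]
  simp only [Int.sub_zero, Int.toNat_natCast, List.map_map, List.length_drop]
  generalize hm : (items.length + 1) / 2 = m
  have hmn : m ≤ items.length := by omega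
  have hnm : items.length - m ≤ m := by omega
  clear hm hmid
  have hlen1 : ((items.take m).zip (items.drop m)).length = items.length - m := by
    rw [List.length_zip, List.length_take, List.length_drop]
    omega
  apply List.ext_getElem
  · simp only [List.length_append, List.length_map, List.length_range, hlen1,
      List.length_drop, List.length_take]
    omega
  · intro i h1 h2
    simp only [List.length_map, List.length_range] at h1
    simp only [List.getElem_map, List.getElem_range, Function.comp_apply]
    have e1 : (0 : Int) + (i : Nat) = ((i : Nat) : Int) := by ring
    have e2 : ((i : Nat) : Int) + (m : Nat) = (((i + m : Nat)) : Int) := by push_cast; ring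
    rw [e1, e2]
    by_cases hc : i < items.length - m
    · rw [if_neg (by push_cast; omega)]
      rw [List.getElem_append_left (by rw [List.length_map, hlen1]; exact hc)]
      rw [pv_getD_map _ _ i (by omega), pv_getD_map _ _ i (by omega),
        pv_getD_map _ _ (i + m) (by omega), pv_getD_map _ _ (i + m) (by omega)]
      simp [List.getElem_zip, List.getElem_take, List.getElem_drop, Nat.add_comm, String.append_assoc]
    · rw [if_pos (by push_cast; omega)]
      rw [List.getElem_append_right (by rw [List.length_map, hlen1]; omega)]
      rw [pv_getD_map _ _ i (by omega), pv_getD_map _ _ i (by omega)]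
      simp only [List.length_map, hlen1, List.getElem_map, List.getElem_drop,
        List.getElem_take]
      have hidx : items.length - m + (i - (items.length - m)) = i := by omega
      simp [hidx]

-- The second phase of B's pass: splicing the right-column labels, enumerated from mid + p,
-- into rows rs at positions p, p+1, … is a zip on the suffix of rs.
theorem pv_modify_append (pre : List String) (r : String) (suf : List String)
    (g : String → String) :
    (pre ++ r :: suf).modify pre.length g = pre ++ g r :: suf := by
  rw [List.modify_eq_set_getElem?]
  simp [List.set_append_right _ _ (Nat.le_refl _)]

theorem pv_modfold (mid : Int) :
    ∀ (ss : List String) (p : Nat) (rs : List String),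
      (PySem.List.enumerate ss (mid + p)).foldl (fun rows x =>
          if x.1 < mid then rows ++ [x.2]
          else rows.modify (x.1 - mid).toNat (fun a => a ++ "\t" ++ x.2)) rs
      = rs.take p ++ ((rs.drop p).zip ss).map (fun q => q.1 ++ "\t" ++ q.2)
          ++ rs.drop (p + ss.length) := by
  intro ss
  induction ss with
  | nil => intro p rs; simp [PySem.List.enumerate_nil]
  | cons s ss ih =>
    intro p rs
    rw [PySem.List.enumerate_cons, List.foldl_cons]
    rw [if_neg (by omega)]
    have hidx : (mid + (p : Nat) - mid).toNat = p := by omega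
    rw [hidx]
    have hs : mid + (p : Nat) + 1 = mid + ((p + 1 : Nat) : Int) := by push_cast; ring
    rw [hs, ih (p + 1)]
    by_cases h : p < rs.length
    · obtain ⟨pre, r, suf, hrs, hlp⟩ :
          ∃ pre r suf, rs = pre ++ r :: suf ∧ pre.length = p :=
        ⟨rs.take p, rs[p], rs.drop (p + 1),
          by rw [← List.drop_eq_getElem_cons h, List.take_append_drop],
          by simp; omega⟩
      subst hrs
      subst hlp
      rw [pv_modify_append]
      have h1t : ∀ (t : List String) (k : Nat), (pre ++ t).take (pre.length + k) = pre ++ t.take k := by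
        intro t k; simp [List.take_append]
      have h1d : ∀ (t : List String) (k : Nat), (pre ++ t).drop (pre.length + k) = t.drop k := by
        intro t k; simp [List.drop_append]
      have e2 : pre.length + 1 + ss.length = pre.length + (1 + ss.length) := by omega
      rw [e2, h1t _ 1, h1d _ (1 + ss.length), h1d _ 1]
      simp only [List.length_cons]
      rw [h1d _ (ss.length + 1), List.take_left, List.drop_left]
      simp [String.append_assoc, Nat.add_comm]
    · have hmod : rs.modify p (fun a => a ++ "\t" ++ s) = rs :=
        List.modify_eq_self (by omega)
      rw [hmod]
      rw [List.drop_of_length_le (by omega : rs.length ≤ p),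
          List.drop_of_length_le (by omega : rs.length ≤ p + 1)]
      simp [List.take_of_length_le (by omega : rs.length ≤ p),
        List.take_of_length_le (by omega : rs.length ≤ p + 1),
        List.drop_of_length_le (by omega : rs.length ≤ p + 1 + ss.length),
        List.drop_of_length_le (by omega : rs.length ≤ p + (ss.length + 1))]

-- B's single enumerate pass over the labels equals the normal form.
theorem format_choices_alt_core (items : List (String × String)) :
    (let labels := items.map (fun p => p.1 ++ ". " ++ p.2)
     let mid : Int := ((labels.length + 1) / 2 : Nat)
     (PySem.List.enumerate labels 0).foldl (fun rows x =>
        if x.1 < mid then rows ++ [x.2]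
        else rows.modify (x.1 - mid).toNat (fun a => a ++ "\t" ++ x.2)) [])
    = pvRows items := by
  simp only [pvRows, List.length_map]
  generalize hm : (items.length + 1) / 2 = m
  have hmn : m ≤ items.length := by omega
  clear hm
  set fmt : String × String → String := fun p => p.1 ++ ". " ++ p.2 with hfmt
  set labels := items.map fmt with hlab
  have hsplit : labels = labels.take m ++ labels.drop m := (List.take_append_drop m labels).symm
  have hlen : labels.length = items.length := by simp [hlab]
  have hlenT : (labels.take m).length = m := by simp [hlen]; omega
  rw [hsplit, PySem.List.enumerate_append, List.foldl_append, hlenT]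
  -- phase 1: the left-column labels are appended in order
  have h1 := PySem.List.foldl_congr_mem
    (l := PySem.List.enumerate (labels.take m) 0) (init := ([] : List String))
    (f := fun rows (x : Int × String) =>
        if x.1 < ((m : Nat) : Int) then rows ++ [x.2]
        else rows.modify (x.1 - ((m : Nat) : Int)).toNat (fun a => a ++ "\t" ++ x.2))
    (g := fun rows (x : Int × String) => rows ++ [x.2])
    (by
      intro acc x hx
      rcases (PySem.List.mem_enumerate_iff _ _ _).1 hx with ⟨k, hk, rfl⟩
      dsimp only
      rw [if_pos (by simp only [List.length_take, hlen] at hk; omega)])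
  rw [h1, PySem.List.foldl_append_singleton_eq_map, List.nil_append,
      PySem.List.map_snd_enumerate]
  -- phase 2: the right-column labels are spliced in by pv_modfold at positions 0, 1, …
  have hstart : (0 : Int) + ((m : Nat) : Int) = ((m : Nat) : Int) + ((0 : Nat) : Int) := by
    push_cast; ring
  rw [hstart, pv_modfold ((m : Nat) : Int) (labels.drop m) 0 (labels.take m)]
  simp only [List.take_zero, List.drop_zero, List.nil_append, Nat.zero_add]
  -- convert from labels to items
  simp only [hlab, ← List.map_take, ← List.map_drop, List.length_map, List.zip_map,
    List.map_map]
  simp [hfmt, Function.comp_def, String.append_assoc]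

-- ===== VERDICT (by name: the statement is the Claim_ definition above) =====
theorem format_choices_spec : Claim_equal_format_choices := by
  intro choices _
  show format_choices choices = format_choices_alt choices
  unfold format_choices format_choices_alt
  have hk : (PySem.Dict.ofList choices).keys = (PySem.Dict.ofList choices).items.map (fun p => p.1) := rfl
  have hv : (PySem.Dict.ofList choices).values = (PySem.Dict.ofList choices).items.map (fun p => p.2) := rfl
  simp only [hk, hv]
  rw [format_choices_core (PySem.Dict.ofList choices).items,
      format_choices_alt_core (PySem.Dict.ofList choices).items]
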